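-- pv_equiv track=rewrite | github.com/tomojitakasu/PocketSDR | test/sdr_code_test.py | code_hex
-- ===== SOURCE A (Python) =====
-- def code_hex(code):
--     str = ''
--     hex = 0
--     for i in range(len(code)):
--         hex = (hex << 1) + (1 if code[i] == 1 else 0)
--         if i % 4 == 3:
--             str += '%1X' % (hex)
--             hex = 0
--     return str
-- ===== SOURCE B (Python) =====
-- def code_hex(code):
--     n = len(code) // 4
--     out = []
--     for g in range(n):
--         b0 = 1 if code[4 * g] == 1 else 0
--         b1 = 1 if code[4 * g + 1] == 1 else 0
--         b2 = 1 if code[4 * g + 2] == 1 else 0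
--         b3 = 1 if code[4 * g + 3] == 1 else 0
--         out.append('%1X' % (b0 * 8 + b1 * 4 + b2 * 2 + b3))
--     return ''.join(out)
-- ===== Notes on version B (the rewrite author's own statement) =====
-- stated objective: alternative
-- what changed: B iterates over nibble groups (len//4 of them), reading four bits by direct index and combining them arithmetically into one hex digit, instead of A's per-bit loop with a running shift accumulator and an i%4==3 flush check.
import Mathlib
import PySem

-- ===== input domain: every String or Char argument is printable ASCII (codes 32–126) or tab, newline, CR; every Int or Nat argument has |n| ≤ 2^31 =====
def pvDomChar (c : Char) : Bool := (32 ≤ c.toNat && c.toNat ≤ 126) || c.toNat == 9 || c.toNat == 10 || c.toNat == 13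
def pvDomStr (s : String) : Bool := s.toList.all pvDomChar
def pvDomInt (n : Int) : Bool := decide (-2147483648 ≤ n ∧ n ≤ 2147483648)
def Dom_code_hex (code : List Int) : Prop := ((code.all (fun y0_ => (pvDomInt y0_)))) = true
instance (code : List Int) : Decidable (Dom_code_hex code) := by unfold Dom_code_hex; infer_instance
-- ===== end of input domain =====

-- B groups the bits into len//4 nibbles read by direct index, instead of A's per-bit shift
-- accumulator with an i%4==3 flush; same output, alternative decomposition (no speed claim).

-- '%1X' % h for h in 0..15 (the only values either program formats): one uppercase hex digit.
def pvHex1 (h : Int) : String :=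
  String.ofList [("0123456789ABCDEF".toList.getD h.toNat '0')]

-- ===== PORT A =====
-- the for-loop of A as structural recursion over the list, carrying index i, string s, accumulator h
def pvALoop : List Int → Nat → String → Int → String
  | [], _, s, _ => s
  | c :: rest, i, s, h =>
    let h' := (h <<< 1) + (if c = 1 then 1 else 0)
    if i % 4 = 3 then pvALoop rest (i + 1) (s ++ pvHex1 h') 0
    else pvALoop rest (i + 1) s h'

def code_hex (code : List Int) : String := pvALoop code 0 "" 0

-- ===== PORT B =====
def code_hex_alt (code : List Int) : String :=
  String.join ((List.range (code.length / 4)).map (fun g =>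
    let b0 : Int := if code.getD (4 * g) 0 = 1 then 1 else 0
    let b1 : Int := if code.getD (4 * g + 1) 0 = 1 then 1 else 0
    let b2 : Int := if code.getD (4 * g + 2) 0 = 1 then 1 else 0
    let b3 : Int := if code.getD (4 * g + 3) 0 = 1 then 1 else 0
    pvHex1 (b0 * 8 + b1 * 4 + b2 * 2 + b3)))

-- ===== PRECONDITION & SPEC =====
def Spec_code_hex (code : List Int) (out : String) : Prop := out = code_hex_alt code
instance (code : List Int) (out : String) : Decidable (Spec_code_hex code out) := by unfold Spec_code_hex; infer_instance

-- ===== CLAIM (what is proved, stated in full; the proofs are below) =====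
def Claim_equal_code_hex : Prop := ∀ (code : List Int), Dom_code_hex code → Spec_code_hex code (code_hex code)

-- ===== LEMMAS AND PROOFS =====

-- proof-side recursive view of the nibble decomposition
def pvChunks : List Int → String
  | a :: b :: c :: d :: t =>
    pvHex1 ((if a = 1 then (1:Int) else 0) * 8 + (if b = 1 then (1:Int) else 0) * 4
      + (if c = 1 then (1:Int) else 0) * 2 + (if d = 1 then (1:Int) else 0)) ++ pvChunks t
  | _ => ""

theorem pvJoin_foldl (l : List String) (a b : String) :
    List.foldl (fun r s => r ++ s) (a ++ b) l = a ++ List.foldl (fun r s => r ++ s) b l := by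
  induction l generalizing b with
  | nil => rfl
  | cons x xs ih => simp only [List.foldl_cons, String.append_assoc, ih]

theorem pvJoin_cons (x : String) (l : List String) :
    String.join (x :: l) = x ++ String.join l := by
  simp only [String.join, List.foldl_cons]
  have h := pvJoin_foldl l x ""
  simpa using h

theorem pvAlt_eq_chunks : ∀ code : List Int, code_hex_alt code = pvChunks code := by
  intro code
  induction code using pvChunks.induct with
  | case1 a b c d t ih =>
    unfold code_hex_alt at ih ⊢
    have hlen : (a :: b :: c :: d :: t).length / 4 = t.length / 4 + 1 := by
      simp [List.length_cons]; omega
    rw [hlen, List.range_succ_eq_map, List.map_cons, pvJoin_cons, pvChunks, ← ih]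
    congr 1
    rw [List.map_map]
    refine congrArg String.join (List.map_congr_left (fun g _ => ?_))
    show pvHex1 _ = pvHex1 _
    have e0 : 4 * (g + 1) = (4 * g + 3) + 1 := by ring
    simp only [e0, List.getD_cons_succ]
  | case2 x h =>
    match x with
    | [] => rfl
    | [a] => simp [code_hex_alt, pvChunks, String.join]
    | [a, b] => simp [code_hex_alt, pvChunks, String.join]
    | [a, b, c] => simp [code_hex_alt, pvChunks, String.join]
    | a :: b :: c :: d :: t => exact absurd rfl (h a b c d t)

theorem pvLoop_eq : ∀ code : List Int, ∀ i : Nat, ∀ s : String,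
    i % 4 = 0 → pvALoop code i s 0 = s ++ pvChunks code := by
  intro code
  induction code using pvChunks.induct with
  | case1 a b c d t ih =>
    intro i s hi
    have h0 : ¬ i % 4 = 3 := by omega
    have h1 : ¬ (i + 1) % 4 = 3 := by omega
    have h2 : ¬ (i + 2) % 4 = 3 := by omega
    have h3 : (i + 3) % 4 = 3 := by omega
    have h4 : (i + 4) % 4 = 0 := by omega
    rw [pvALoop]; simp only [h0, if_false]
    rw [pvALoop]; simp only [h1, if_false]
    rw [pvALoop]; simp only [h2, if_false]
    rw [pvALoop]; simp only [h3, if_true]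
    rw [ih (i + 3 + 1) _ (by omega)]
    rw [pvChunks, ← String.append_assoc]
    congr 2
    split_ifs <;> decide
  | case2 x h =>
    intro i s hi
    match x with
    | [] => simp [pvALoop, pvChunks]
    | [a] =>
      have h0 : ¬ i % 4 = 3 := by omega
      simp [pvALoop, h0, pvChunks]
    | [a, b] =>
      have h0 : ¬ i % 4 = 3 := by omega
      have h1 : ¬ (i + 1) % 4 = 3 := by omega
      simp [pvALoop, h0, h1, pvChunks]
    | [a, b, c] =>
      have h0 : ¬ i % 4 = 3 := by omega
      have h1 : ¬ (i + 1) % 4 = 3 := by omega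
      have h2 : ¬ (i + 2) % 4 = 3 := by omega
      simp [pvALoop, h0, h1, h2, pvChunks]
    | a :: b :: c :: d :: t => exact absurd rfl (h a b c d t)

-- ===== VERDICT (by name: the statement is the Claim_ definition above) =====
theorem code_hex_spec : Claim_equal_code_hex := by
  intro code _
  unfold Spec_code_hex code_hex
  rw [pvLoop_eq code 0 "" rfl, pvAlt_eq_chunks]
  simp
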